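-- pv_equiv track=rewrite | github.com/seungwoo7050/multiagent | src/prompts/templates.py | _parse_field_name
-- ===== SOURCE A (Python) =====
-- from typing import Any, Dict, Optional, List, Set, Tuple
--
-- def _parse_field_name(field_name: str) -> List[str]:
--     """
--     Parse a field name into parts split by dots and brackets.
--
--     Args:
--         field_name: The field name to parse (e.g., "person.hobbies[0]")
--
--     Returns:
--         A list of parts (e.g., ["person", "hobbies", "[0]"])
--     """
--     parts = []
--     current = ""
--     i = 0
--
--     while i < len(field_name):
--         if field_name[i] == '.':
--             if current:
--                 parts.append(current)
--                 current = ""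
--         elif field_name[i] == '[':
--             if current:
--                 parts.append(current)
--                 current = ""
--             # Capture the entire bracket expression
--             bracket = "["
--             i += 1
--             while i < len(field_name) and field_name[i] != ']':
--                 bracket += field_name[i]
--                 i += 1
--             if i < len(field_name):  # Add the closing bracket if it exists
--                 bracket += ']'
--             parts.append(bracket)
--         else:
--             current += field_name[i]
--         i += 1
--
--     if current:  # Add the last part if it exists
--         parts.append(current)
--
--     return parts
-- ===== SOURCE B (Python) =====
-- from typing import List
--
-- def _parse_field_name(field_name: str) -> List[str]:
--     """Tokenizer: repeatedly consume a dot, a bracket expression, or a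
--     maximal run of plain characters from the front of the string."""
--     tokens = []
--     s = field_name
--     while s:
--         if s[0] == '.':
--             s = s[1:]
--         elif s[0] == '[':
--             j = s.find(']', 1)
--             if j < 0:
--                 tokens.append(s)
--                 s = ""
--             else:
--                 tokens.append(s[:j + 1])
--                 s = s[j + 1:]
--         else:
--             k = next((i for i, ch in enumerate(s) if ch in '.['), len(s))
--             tokens.append(s[:k])
--             s = s[k:]
--     return tokens
-- ===== Notes on version B (the rewrite author's own statement) =====
-- stated objective: faster
-- what changed: A walks the string char by char maintaining a `current` accumulator flushed at each delimiter (repeated string concatenation); B is a front-consuming tokenizer that slices off one whole token per iteration (skip a dot, s.find the closing bracket, or take the maximal plain run) with no accumulator.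
import Mathlib
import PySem

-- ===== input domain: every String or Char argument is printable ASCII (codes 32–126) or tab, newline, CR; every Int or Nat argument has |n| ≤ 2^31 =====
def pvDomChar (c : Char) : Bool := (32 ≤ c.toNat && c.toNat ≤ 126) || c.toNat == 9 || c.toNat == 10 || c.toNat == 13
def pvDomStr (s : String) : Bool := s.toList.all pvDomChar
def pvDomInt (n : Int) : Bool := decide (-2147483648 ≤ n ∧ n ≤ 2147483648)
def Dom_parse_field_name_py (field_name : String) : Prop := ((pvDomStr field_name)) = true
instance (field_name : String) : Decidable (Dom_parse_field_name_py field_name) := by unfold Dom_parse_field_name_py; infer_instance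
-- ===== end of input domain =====

-- B replaces A's char-by-char state machine (accumulator `current` flushed on
-- delimiters) by a front-consuming tokenizer that slices off one whole token
-- per step; objective: faster (avoids A's char-by-char string concatenation), measured faster in a timing run.

-- ===== PORT A =====
-- A's inner `while` that collects the bracket expression: returns the bracket
-- text and the remaining characters after the closing ']' (or [] at end).
def pfnBracket (s : List Char) (bracket : List Char) : List Char × List Char :=
  match s with
  | [] => (bracket, [])
  | c :: rest => if c = ']' then (bracket ++ [']'], rest) else pfnBracket rest (bracket ++ [c])

theorem pfnBracket_snd_le (s : List Char) (b : List Char) :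
    (pfnBracket s b).2.length ≤ s.length := by
  induction s generalizing b with
  | nil => simp [pfnBracket]
  | cons c rest ih =>
    simp only [pfnBracket]
    split
    · simpa using Nat.le_succ _
    · exact (ih _).trans (Nat.le_succ _)

-- A's outer while loop: state = remaining chars, `current`, `parts`.
def pfnGo (s : List Char) (current : List Char) (parts : List String) : List String :=
  match s with
  | [] => if current = [] then parts else parts ++ [String.mk current]
  | c :: rest =>
    if c = '.' then
      pfnGo rest [] (if current = [] then parts else parts ++ [String.mk current])
    else if c = '[' then
      let parts' := if current = [] then parts else parts ++ [String.mk current]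
      let br := pfnBracket rest ['[']
      pfnGo br.2 [] (parts' ++ [String.mk br.1])
    else
      pfnGo rest (current ++ [c]) parts
termination_by s.length
decreasing_by
  · simp
  · exact Nat.lt_succ_of_le (pfnBracket_snd_le rest ['['])
  · simp

def parse_field_name_py (field_name : String) : List String :=
  pfnGo field_name.toList [] []

-- ===== PORT B =====
-- `next((i for i, ch in enumerate(s) if ch in '.['), len(s))` from Source B
def pfnRunLen (s : List Char) : Nat :=
  (s.findIdx? (fun ch => ch = '.' ∨ ch = '[')).getD s.length

theorem pfnRunLen_pos (c : Char) (rest : List Char) (h1 : ¬ c = '.') (h2 : ¬ c = '[') :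
    1 ≤ pfnRunLen (c :: rest) := by
  simp only [pfnRunLen, List.findIdx?_cons, h1, h2, or_self, decide_false]
  cases h : (rest.findIdx? (fun ch => decide (ch = '.' ∨ ch = '['))) <;> simp [Option.getD]

def pfnAltGo (s : List Char) : List String :=
  match s with
  | [] => []
  | c :: rest =>
    if c = '.' then pfnAltGo rest
    else if c = '[' then
      -- s.find(']', 1): first ']' strictly after the opening bracket
      match rest.findIdx? (fun ch => ch = ']') with
      | none => [String.mk (c :: rest)]
      | some j => String.mk ((c :: rest).take (j + 2)) :: pfnAltGo ((c :: rest).drop (j + 2))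
    else
      let k := pfnRunLen (c :: rest)
      String.mk ((c :: rest).take k) :: pfnAltGo ((c :: rest).drop k)
termination_by s.length
decreasing_by
  · simp
  · simp
  · rename_i h1 h2
    have := pfnRunLen_pos c rest h1 h2
    simp; omega

def parse_field_name_py_alt (field_name : String) : List String :=
  pfnAltGo field_name.toList

-- ===== PRECONDITION & SPEC =====
def Spec_parse_field_name_py (field_name : String) (out : List String) : Prop := out = parse_field_name_py_alt field_name
instance (field_name : String) (out : List String) : Decidable (Spec_parse_field_name_py field_name out) := by unfold Spec_parse_field_name_py; infer_instance

-- ===== CLAIM (what is proved, stated in full; the proofs are below) =====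
def Claim_equal_parse_field_name_py : Prop := ∀ (field_name : String), Dom_parse_field_name_py field_name → Spec_parse_field_name_py field_name (parse_field_name_py field_name)

-- ===== LEMMAS AND PROOFS =====

-- what A's loop produces given a pending accumulator `cur`, expressed via B
def pfnWithCur (cur : List Char) (s : List Char) : List String :=
  let r := pfnRunLen s
  if r = 0 then (if cur = [] then pfnAltGo s else String.mk cur :: pfnAltGo s)
  else String.mk (cur ++ s.take r) :: pfnAltGo (s.drop r)

theorem pfnRunLen_cons (c : Char) (rest : List Char) (h1 : ¬ c = '.') (h2 : ¬ c = '[') :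
    pfnRunLen (c :: rest) = pfnRunLen rest + 1 := by
  simp only [pfnRunLen, List.findIdx?_cons, h1, h2, or_self, decide_false, if_false,
    List.length_cons]
  cases h : (rest.findIdx? (fun ch => decide (ch = '.' ∨ ch = '['))) <;> simp [Option.getD]

theorem pfnWithCur_nil (s : List Char) : pfnWithCur [] s = pfnAltGo s := by
  unfold pfnWithCur
  by_cases h : pfnRunLen s = 0
  · simp [h]
  · simp only [h, if_false, List.nil_append]
    match s with
    | [] => simp [pfnRunLen] at h
    | c :: rest =>
      have hc1 : ¬ c = '.' := by
        intro hc; simp [pfnRunLen, List.findIdx?_cons, hc] at h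
      have hc2 : ¬ c = '[' := by
        intro hc; simp [pfnRunLen, List.findIdx?_cons, hc] at h
      conv_rhs => unfold pfnAltGo
      simp [hc1, hc2]

theorem pfnWithCur_step (c : Char) (rest : List Char) (cur : List Char)
    (h1 : ¬ c = '.') (h2 : ¬ c = '[') :
    pfnWithCur cur (c :: rest) = pfnWithCur (cur ++ [c]) rest := by
  unfold pfnWithCur
  rw [pfnRunLen_cons c rest h1 h2]
  by_cases hr : pfnRunLen rest = 0
  · simp [hr]
  · simp only [hr, if_false, Nat.succ_ne_zero, List.take_succ_cons, List.drop_succ_cons]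
    simp

theorem pfnBracket_spec (s : List Char) (b : List Char) :
    pfnBracket s b =
      match s.findIdx? (fun ch => ch = ']') with
      | none => (b ++ s, [])
      | some j => (b ++ s.take j ++ [']'], s.drop (j + 1)) := by
  induction s generalizing b with
  | nil => simp [pfnBracket]
  | cons c rest ih =>
    by_cases hc : c = ']'
    · simp [pfnBracket, hc, List.findIdx?_cons]
    · simp only [pfnBracket, hc, if_false, List.findIdx?_cons, decide_eq_true_eq,
        Option.map_eq_map]
      rw [ih]
      cases h : (rest.findIdx? (fun ch => decide (ch = ']'))) <;>
        simp [h, hc, List.take_succ_cons, List.drop_succ_cons]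

theorem pfnGo_eq_aux (n : Nat) : ∀ s : List Char, s.length ≤ n → ∀ cur parts,
    pfnGo s cur parts = parts ++ pfnWithCur cur s := by
  induction n with
  | zero =>
    intro s hs cur parts
    have : s = [] := List.length_eq_zero_iff.mp (Nat.le_zero.mp hs)
    subst this
    simp only [pfnGo, pfnWithCur, pfnRunLen, List.findIdx?_nil, Option.getD_none,
      List.length_nil, if_true, pfnAltGo]
    by_cases h : cur = ([] : List Char) <;> simp [h]
  | succ n ih =>
    intro s hs cur parts
    match s with
    | [] =>
      simp only [pfnGo, pfnWithCur, pfnRunLen, List.findIdx?_nil, Option.getD_none,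
        List.length_nil, if_true, pfnAltGo]
      by_cases h : cur = ([] : List Char) <;> simp [h]
    | c :: rest =>
      have hrest : rest.length ≤ n := by simpa using Nat.lt_succ_iff.mp (Nat.lt_of_lt_of_le (by simp) hs)
      by_cases hdot : c = '.'
      · subst hdot
        rw [show pfnGo ('.' :: rest) cur parts =
            pfnGo rest [] (if cur = [] then parts else parts ++ [String.mk cur]) from by
          simp [pfnGo]]
        rw [ih rest hrest, pfnWithCur_nil]
        have hr0 : pfnRunLen ('.' :: rest) = 0 := by
          simp [pfnRunLen, List.findIdx?_cons]
        have halt : pfnAltGo ('.' :: rest) = pfnAltGo rest := by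
          conv_lhs => unfold pfnAltGo
          simp
        unfold pfnWithCur
        simp only [hr0, if_true, halt]
        by_cases h : cur = ([] : List Char) <;> simp [h]
      · by_cases hbr : c = '['
        · subst hbr
          have hgo : pfnGo ('[' :: rest) cur parts =
              pfnGo (pfnBracket rest ['[']).2 []
                ((if cur = [] then parts else parts ++ [String.mk cur]) ++
                  [String.mk (pfnBracket rest ['[']).1]) := by
            conv_lhs => unfold pfnGo
            simp
          rw [hgo, ih _ ((pfnBracket_snd_le rest ['[']).trans hrest), pfnWithCur_nil]
          have hr0 : pfnRunLen ('[' :: rest) = 0 := by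
            simp [pfnRunLen, List.findIdx?_cons]
          unfold pfnWithCur
          simp only [hr0, if_true]
          have halt : String.mk (pfnBracket rest ['[']).1 :: pfnAltGo (pfnBracket rest ['[']).2
              = pfnAltGo ('[' :: rest) := by
            conv_rhs => unfold pfnAltGo
            rw [pfnBracket_spec]
            cases h : (rest.findIdx? (fun ch => decide (ch = ']'))) with
            | none => simp [h, pfnAltGo]
            | some j =>
              have hj : j < rest.length ∧ rest[j]? = some ']' := by
                obtain ⟨hlt, hp, -⟩ := List.findIdx?_eq_some_iff_getElem.mp h
                simp only [decide_eq_true_eq] at hp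
                exact ⟨hlt, by simp [List.getElem?_eq_getElem hlt, hp]⟩
              have htake : rest.take (j + 1) = rest.take j ++ [']'] := by
                rw [List.take_add_one, hj.2]
                simp
              simp [h, List.take_succ_cons, List.drop_succ_cons, htake]
          rw [← halt]
          by_cases h : cur = ([] : List Char) <;> simp [h]
        · rw [show pfnGo (c :: rest) cur parts = pfnGo rest (cur ++ [c]) parts from by
            conv_lhs => unfold pfnGo
            simp [hdot, hbr]]
          rw [ih rest hrest, pfnWithCur_step c rest cur hdot hbr]

theorem pfnGo_eq (s : List Char) : ∀ cur parts, pfnGo s cur parts = parts ++ pfnWithCur cur s :=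
  pfnGo_eq_aux s.length s (le_refl _)

-- ===== VERDICT (by name: the statement is the Claim_ definition above) =====
theorem parse_field_name_py_spec : Claim_equal_parse_field_name_py := by
  intro s _
  unfold Spec_parse_field_name_py parse_field_name_py parse_field_name_py_alt
  rw [pfnGo_eq, pfnWithCur_nil]; simp
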